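-- pv_equiv track=rewrite | github.com/RymKacz/prg-basics | 10-Test2/p3.py | f
-- ===== SOURCE A (Python) =====
-- def f(n):
--     word = ''
--     if n == 0:
--         return word
--     elif n ==1:
--         word = '*'
--         return word
--     else:
--         for i in range (0,n*2-1):
--             if i%2 == 0:
--                 word += "*"
--             else:
--                 word += "/"
--     return word
-- ===== SOURCE B (Python) =====
-- def f(n):
--     return ('*/' * n)[:2*n-1]
-- ===== Notes on version B (the rewrite author's own statement) =====
-- stated objective: simpler
-- what changed: Replaces the index loop with i%2 branching and repeated string concatenation by a closed form: repeat the two-char unit '*/' n times and slice off the trailing '/' with [:2*n-1].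
import Mathlib
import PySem

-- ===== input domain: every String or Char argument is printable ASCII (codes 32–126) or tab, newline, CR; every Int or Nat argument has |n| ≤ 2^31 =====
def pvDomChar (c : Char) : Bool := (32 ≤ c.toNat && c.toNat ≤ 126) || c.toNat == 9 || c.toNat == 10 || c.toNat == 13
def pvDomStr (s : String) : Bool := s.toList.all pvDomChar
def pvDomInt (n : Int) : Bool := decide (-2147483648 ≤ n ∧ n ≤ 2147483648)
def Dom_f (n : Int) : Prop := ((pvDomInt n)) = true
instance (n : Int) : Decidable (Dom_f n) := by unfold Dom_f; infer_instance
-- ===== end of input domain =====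

-- ===== PORT A =====
-- B builds the alternating string by a closed form (repeat '*/' then slice); return-value equivalence proved on all Int n.
def f (n : Int) : String :=
  let word : List Char := []
  if n = 0 then String.ofList word
  else if n = 1 then String.ofList ['*']
  else
    String.ofList ((PySem.List.pyRange 0 (n*2-1) 1).foldl
      (fun acc i => if PySem.Int.mod i 2 = 0 then acc ++ ['*'] else acc ++ ['/']) word)

-- ===== PORT B =====
def f_alt (n : Int) : String :=
  String.ofList (PySem.List.slice (PySem.List.pyRepeat ['*', '/'] n) none (some (2*n - 1)))

-- ===== PRECONDITION & SPEC =====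
def Spec_f (n : Int) (out : String) : Prop := out = f_alt n
instance (n : Int) (out : String) : Decidable (Spec_f n out) := by unfold Spec_f; infer_instance

-- ===== CLAIM (what is proved, stated in full; the proofs are below) =====
def Claim_equal_f : Prop := ∀ (n : Int), Dom_f n → Spec_f n (f n)

-- ===== LEMMAS AND PROOFS =====

-- ===== VERDICT (by name: the statement is the Claim_ definition above) =====

theorem alt_flatten (m : Nat) :
    (List.replicate m ['*', '/']).flatten
      = (List.range (2*m)).map (fun k => if k % 2 = 0 then '*' else '/') := by
  induction m with
  | zero => simp
  | succ m ih =>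
    rw [List.replicate_succ', List.flatten_append,
        show 2*(m+1) = 2*m + 1 + 1 by ring, List.range_succ, List.range_succ]
    simp [ih, Nat.mul_mod_right, Nat.add_mod]

theorem f_spec : Claim_equal_f := by
  intro n _
  unfold Spec_f f f_alt
  rcases le_or_gt n 0 with hn | hn
  · have h1 : PySem.List.pyRange 0 (n*2-1) 1 = ([] : List Int) :=
      PySem.List.pyRange_one_eq_nil (by omega)
    have h2 : n.toNat = 0 := by omega
    rcases eq_or_ne n 0 with h | h
    · simp [h, PySem.List.pyRepeat, PySem.List.slice]
    · simp [h, show n ≠ 1 by omega, h1, PySem.List.pyRepeat, h2, PySem.List.slice]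
  · have hnn : (0:Int) ≤ 2*n - 1 := by omega
    have hrep : PySem.List.pyRepeat ['*', '/'] n
        = (List.range (2*n.toNat)).map (fun k => if k % 2 = 0 then '*' else '/') := by
      simpa [PySem.List.pyRepeat] using alt_flatten n.toNat
    have hsl : PySem.List.slice (PySem.List.pyRepeat ['*', '/'] n) none (some (2*n - 1))
        = (List.range ((2*n-1).toNat)).map (fun k => if k % 2 = 0 then '*' else '/') := by
      rw [PySem.List.slice_to _ hnn, hrep, ← List.map_take, List.take_range]
      congr 2
      omega
    rcases eq_or_ne n 1 with h1 | h1
    · subst h1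
      decide
    · have h0 : n ≠ 0 := by omega
      have hA : (PySem.List.pyRange 0 (n*2-1) 1).foldl
          (fun acc i => if PySem.Int.mod i 2 = 0 then acc ++ ['*'] else acc ++ ['/']) []
          = (List.range ((2*n-1).toNat)).map (fun k => if k % 2 = 0 then '*' else '/') := by
        have hfun : (fun (acc : List Char) (i : Int) =>
            if PySem.Int.mod i 2 = 0 then acc ++ ['*'] else acc ++ ['/'])
          = fun acc i => acc ++ [if PySem.Int.mod i 2 = 0 then '*' else '/'] := by
          funext acc i; split <;> simp_all
        rw [hfun, PySem.List.foldl_append_singleton_eq_map,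
            show n*2-1 = 2*n-1 by ring, PySem.List.pyRange_zero, List.map_map]
        refine List.map_congr_left (fun a _ => ?_)
        have hd : (2:Int) ∣ (a:Int) ↔ a % 2 = 0 := by omega
        simp [Function.comp, hd]
      simp only [if_neg h0, if_neg h1]
      rw [hA, hsl]
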